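-- pv_equiv track=rewrite | github.com/Maithili/TAACO | utils/eval_helpers.py | _cm_dict_to_robot_crossed_boundaries
-- ===== SOURCE A (Python) =====
-- def _cm_dict_to_robot_crossed_boundaries(cm_dict):
--     sum = 0
--     for gt in cm_dict:
--         if gt in ['no_action','remind']:
--             for pred in cm_dict[gt]:
--                 if pred in ['do_now','do_later']:
--                     sum += cm_dict[gt][pred]
--     return sum
-- ===== SOURCE B (Python) =====
-- def _cm_dict_to_robot_crossed_boundaries(cm_dict):
--     return sum(cm_dict.get(gt, {}).get(pred, 0)
--                for gt in ('no_action', 'remind')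
--                for pred in ('do_now', 'do_later'))
-- ===== Notes on version B (the rewrite author's own statement) =====
-- stated objective: simpler
-- what changed: Instead of scanning every entry of cm_dict and filtering with membership tests, B directly sums the four relevant cells cm_dict.get(gt,{}).get(pred,0) over the two fixed gt keys and two fixed pred keys.
import Mathlib
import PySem

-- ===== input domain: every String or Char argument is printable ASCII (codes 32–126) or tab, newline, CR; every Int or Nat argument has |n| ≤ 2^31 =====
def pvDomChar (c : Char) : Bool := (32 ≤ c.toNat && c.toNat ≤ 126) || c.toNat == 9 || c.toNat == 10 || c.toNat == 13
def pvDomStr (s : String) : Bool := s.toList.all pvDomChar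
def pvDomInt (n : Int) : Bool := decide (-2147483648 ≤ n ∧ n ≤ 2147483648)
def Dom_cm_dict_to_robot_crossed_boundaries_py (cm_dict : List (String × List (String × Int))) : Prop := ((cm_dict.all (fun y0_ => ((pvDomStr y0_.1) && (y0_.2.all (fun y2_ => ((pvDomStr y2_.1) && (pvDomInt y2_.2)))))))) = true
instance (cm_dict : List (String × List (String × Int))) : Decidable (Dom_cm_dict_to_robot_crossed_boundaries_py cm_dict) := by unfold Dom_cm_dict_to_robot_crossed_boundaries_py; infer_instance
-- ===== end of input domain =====

-- B replaces A's scan over all of cm_dict by a direct sum of the four relevant cells (simpler).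


-- ===== PORT A =====
-- Literal port of A: fold over the dict's entries (Python: `for gt in cm_dict` iterates keys,
-- `cm_dict[gt]` is a first-match lookup), inner loop the same for the inner dict.
def cm_dict_to_robot_crossed_boundaries_py (cm_dict : List (String × List (String × Int))) : Int :=
  cm_dict.foldl (fun sum kv =>
    let gt := kv.1
    if gt = "no_action" ∨ gt = "remind" then
      let inner := (List.lookup gt cm_dict).getD []
      inner.foldl (fun sum2 pv =>
        let pred := pv.1
        if pred = "do_now" ∨ pred = "do_later" then
          sum2 + (List.lookup pred inner).getD 0
        else sum2) sum
    else sum) 0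

-- ===== PORT B =====
-- Port of B: sum of cm_dict.get(gt, {}).get(pred, 0) over the four fixed (gt, pred) cells.
def cm_dict_to_robot_crossed_boundaries_py_alt (cm_dict : List (String × List (String × Int))) : Int :=
  ((["no_action", "remind"] : List String).flatMap (fun gt =>
    (["do_now", "do_later"] : List String).map (fun pred =>
      (List.lookup pred ((List.lookup gt cm_dict).getD [])).getD 0))).sum

-- ===== PRECONDITION & SPEC =====
-- Pre_ only requires the association list to actually represent Python dicts: no duplicate keys
-- at either level (a Python dict can never contain duplicates, so no real input is excluded).
def Pre_cm_dict_to_robot_crossed_boundaries_py (cm_dict : List (String × List (String × Int))) : Prop :=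
  (cm_dict.map Prod.fst).Nodup ∧ ∀ p ∈ cm_dict, (p.2.map Prod.fst).Nodup
instance (cm_dict : List (String × List (String × Int))) : Decidable (Pre_cm_dict_to_robot_crossed_boundaries_py cm_dict) := by unfold Pre_cm_dict_to_robot_crossed_boundaries_py; infer_instance

def pvWitness_cm_dict_to_robot_crossed_boundaries_py : (List (String × List (String × Int))) :=
  [("no_action", [("do_now", 3), ("skip", 1)]), ("remind", [("do_later", 4)]), ("other", [("do_now", 7)])]

def Spec_cm_dict_to_robot_crossed_boundaries_py (cm_dict : List (String × List (String × Int))) (out : Int) : Prop := out = cm_dict_to_robot_crossed_boundaries_py_alt cm_dict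
instance (cm_dict : List (String × List (String × Int))) (out : Int) : Decidable (Spec_cm_dict_to_robot_crossed_boundaries_py cm_dict out) := by unfold Spec_cm_dict_to_robot_crossed_boundaries_py; infer_instance

-- ===== CLAIM (what is proved, stated in full; the proofs are below) =====
def Claim_equal_cm_dict_to_robot_crossed_boundaries_py : Prop := ∀ (cm_dict : List (String × List (String × Int))), Dom_cm_dict_to_robot_crossed_boundaries_py cm_dict → Pre_cm_dict_to_robot_crossed_boundaries_py cm_dict → Spec_cm_dict_to_robot_crossed_boundaries_py cm_dict (cm_dict_to_robot_crossed_boundaries_py cm_dict)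

-- ===== LEMMAS AND PROOFS =====

theorem lookup_eq_none_of_not_mem {α : Type} (k : String) (l : List (String × α))
    (h : k ∉ l.map Prod.fst) : List.lookup k l = none := by
  induction l with
  | nil => rfl
  | cons p t ih =>
    simp only [List.map_cons, List.mem_cons, not_or] at h
    have hb : (k == p.1) = false := beq_eq_false_iff_ne.mpr h.1
    simp [List.lookup, hb, ih h.2]

theorem lookup_of_mem_nodup {α : Type} (k : String) (v : α) (l : List (String × α))
    (hn : (l.map Prod.fst).Nodup) (hm : (k, v) ∈ l) : List.lookup k l = some v := by
  induction l with
  | nil => cases hm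
  | cons p t ih =>
    simp only [List.map_cons, List.nodup_cons] at hn
    rcases List.mem_cons.1 hm with h | h
    · subst h; simp [List.lookup]
    · have hk : k ∈ t.map Prod.fst := List.mem_map.2 ⟨(k, v), h, rfl⟩
      have hne : p.1 ≠ k := fun e => hn.1 (e ▸ hk)
      have hb : (k == p.1) = false := beq_eq_false_iff_ne.mpr (Ne.symm hne)
      simp [List.lookup, hb, ih hn.2 h]

-- generic: a single pass that adds the value of every entry keyed a or b equals the
-- two direct lookups, provided keys are unique
theorem foldl_two_key {α : Type} (a b : String) (hab : a ≠ b) (v : α → Int)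
    (l : List (String × α)) (hn : (l.map Prod.fst).Nodup) (s : Int) :
    l.foldl (fun s kv => if kv.1 = a ∨ kv.1 = b then s + v kv.2 else s) s
      = s + ((List.lookup a l).map v).getD 0 + ((List.lookup b l).map v).getD 0 := by
  induction l generalizing s with
  | nil => simp [List.lookup]
  | cons p t ih =>
    simp only [List.map_cons, List.nodup_cons] at hn
    have ihs := ih hn.2
    by_cases hpa : p.1 = a
    · have hb : a ∉ t.map Prod.fst := hpa ▸ hn.1
      have hla : List.lookup a t = none := lookup_eq_none_of_not_mem _ _ hb
      have e1 : (a == p.1) = true := beq_iff_eq.mpr hpa.symm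
      have e2 : (b == p.1) = false := beq_eq_false_iff_ne.mpr (fun e => hab (hpa ▸ e.symm ▸ rfl))
      have e3 : (b == a) = false := beq_eq_false_iff_ne.mpr (Ne.symm hab)
      simp [List.foldl_cons, hpa, List.lookup, e3, ihs, hla]
    · by_cases hpb : p.1 = b
      · have hb : b ∉ t.map Prod.fst := hpb ▸ hn.1
        have hlb : List.lookup b t = none := lookup_eq_none_of_not_mem _ _ hb
        have e1 : (a == p.1) = false := beq_eq_false_iff_ne.mpr (fun e => hpa e.symm)
        have e2 : (b == p.1) = true := beq_iff_eq.mpr hpb.symm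
        have e3 : (a == b) = false := beq_eq_false_iff_ne.mpr hab
        simp [List.foldl_cons, hpb, List.lookup, e3, ihs, hlb]
        ring
      · have e1 : (a == p.1) = false := beq_eq_false_iff_ne.mpr (fun e => hpa e.symm)
        have e2 : (b == p.1) = false := beq_eq_false_iff_ne.mpr (fun e => hpb e.symm)
        simp [List.foldl_cons, hpa, hpb, List.lookup, e1, e2, ihs]

-- the inner dict's contribution, written the way the B port reads it
def pvInnerG (inner : List (String × Int)) : Int :=
  (List.lookup "do_now" inner).getD 0 + (List.lookup "do_later" inner).getD 0

theorem inner_foldl_eq (inner : List (String × Int)) (hn : (inner.map Prod.fst).Nodup) (s : Int) :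
    inner.foldl (fun sum2 pv =>
        if pv.1 = "do_now" ∨ pv.1 = "do_later" then
          sum2 + (List.lookup pv.1 inner).getD 0
        else sum2) s = s + pvInnerG inner := by
  have hcongr : inner.foldl (fun sum2 pv =>
        if pv.1 = "do_now" ∨ pv.1 = "do_later" then
          sum2 + (List.lookup pv.1 inner).getD 0
        else sum2) s
      = inner.foldl (fun sum2 pv =>
        if pv.1 = "do_now" ∨ pv.1 = "do_later" then sum2 + pv.2 else sum2) s := by
    refine PySem.List.foldl_congr_mem _ _ _ _ (fun acc pv hpv => ?_)
    rw [lookup_of_mem_nodup pv.1 pv.2 inner hn hpv]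
    rfl
  rw [hcongr]
  have h := foldl_two_key "do_now" "do_later" (by decide) (id : Int → Int) inner hn s
  simpa [pvInnerG, Option.getD_map, add_assoc] using h

theorem cm_dict_to_robot_crossed_boundaries_py_spec : Claim_equal_cm_dict_to_robot_crossed_boundaries_py := by
  intro cm _hdom hpre
  obtain ⟨hno, hni⟩ := hpre
  show cm_dict_to_robot_crossed_boundaries_py cm = cm_dict_to_robot_crossed_boundaries_py_alt cm
  unfold cm_dict_to_robot_crossed_boundaries_py
  have step1 : cm.foldl (fun sum kv =>
      if kv.1 = "no_action" ∨ kv.1 = "remind" then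
        ((List.lookup kv.1 cm).getD []).foldl (fun sum2 pv =>
          if pv.1 = "do_now" ∨ pv.1 = "do_later" then
            sum2 + (List.lookup pv.1 ((List.lookup kv.1 cm).getD [])).getD 0
          else sum2) sum
      else sum) 0
      = cm.foldl (fun sum kv =>
        if kv.1 = "no_action" ∨ kv.1 = "remind" then sum + pvInnerG kv.2 else sum) 0 := by
    refine PySem.List.foldl_congr_mem _ _ _ _ (fun acc kv hkv => ?_)
    rw [lookup_of_mem_nodup kv.1 kv.2 cm hno hkv]
    by_cases hg : kv.1 = "no_action" ∨ kv.1 = "remind"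
    · simp only [hg, if_pos, Option.getD_some]
      exact inner_foldl_eq kv.2 (hni kv hkv) acc
    · simp [hg]
  simp only [] at step1 ⊢
  rw [step1, foldl_two_key "no_action" "remind" (by decide) pvInnerG cm hno 0]
  simp [cm_dict_to_robot_crossed_boundaries_py_alt]
  cases List.lookup "no_action" cm <;> cases List.lookup "remind" cm <;>
    simp [pvInnerG] <;> ring
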